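-- pv_equiv track=rewrite | github.com/tjthejuggler/tail | habitdb_analyzer/habitdb_streak_finder.py | get_days_since_zero
-- ===== SOURCE A (Python) =====
-- def get_days_since_zero(inner_dict, target_date):
--     days_since_zero = None
--     sorted_dates = [d for d in inner_dict.keys() if d <= target_date]
--     sorted_dates.sort(reverse=True)
--     for index, date_str in enumerate(sorted_dates):
--         if inner_dict[date_str] == 0:
--             days_since_zero = index
--             break
--     if days_since_zero is None:
--         days_since_zero = len(sorted_dates)
--     return days_since_zero
-- ===== SOURCE B (Python) =====
-- def get_days_since_zero(inner_dict, target_date):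
--     # Single linear pass instead of sort: find the latest zero-valued date <= target,
--     # then count dates strictly between it and target (inclusive of target).
--     best = None
--     for d, v in inner_dict.items():
--         if v == 0 and d <= target_date and (best is None or d > best):
--             best = d
--     count = 0
--     for d in inner_dict:
--         if d <= target_date and (best is None or d > best):
--             count += 1
--     return count
-- ===== Notes on version B (the rewrite author's own statement) =====
-- stated objective: alternative
-- what changed: Replaces A's build-filter-sort of all dates and indexed scan by two linear passes: one fold finding the latest zero-valued date <= target, one count of dates <= target later than it (intended as faster, O(n log n) -> O(n); measured only 1.41x at the largest size).
import Mathlib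
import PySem

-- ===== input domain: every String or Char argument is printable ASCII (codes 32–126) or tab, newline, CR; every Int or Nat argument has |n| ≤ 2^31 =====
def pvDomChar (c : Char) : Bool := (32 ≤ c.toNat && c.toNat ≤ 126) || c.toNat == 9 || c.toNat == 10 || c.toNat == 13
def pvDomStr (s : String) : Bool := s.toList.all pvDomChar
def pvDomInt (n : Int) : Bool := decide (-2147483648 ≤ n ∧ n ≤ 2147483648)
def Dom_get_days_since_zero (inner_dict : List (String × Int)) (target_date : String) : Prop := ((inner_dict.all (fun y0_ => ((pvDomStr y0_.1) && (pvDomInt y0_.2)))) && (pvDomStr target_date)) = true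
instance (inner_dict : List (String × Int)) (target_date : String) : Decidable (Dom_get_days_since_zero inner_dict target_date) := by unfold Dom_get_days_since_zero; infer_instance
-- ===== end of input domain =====

-- B replaces A's sort of all dates ≤ target by one linear scan for the latest
-- zero-valued date ≤ target plus one counting scan (a sort-free alternative).

-- ===== PORT A =====
-- the `for index, date_str in enumerate(sorted_dates): if inner_dict[date_str] == 0: … break` loop;
-- every date_str is one of the dict's own keys, so `inner_dict[date_str]` never raises and getD is exact.
def pvLoopA (d : PySem.Dict String Int) : List String → Nat → Option Nat
  | [], _ => none
  | k :: rest, i => if d.getD k 0 == 0 then some i else pvLoopA d rest (i + 1)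

def get_days_since_zero (inner_dict : List (String × Int)) (target_date : String) : Int :=
  let d := PySem.Dict.ofList inner_dict
  let sorted_dates := PySem.List.sorted ((PySem.Dict.keys d).filter (fun k => decide (k ≤ target_date))) (fun x => x) true
  match pvLoopA d sorted_dates 0 with
  | some i => (i : Int)
  | none => (sorted_dates.length : Int)

-- ===== PORT B =====
def get_days_since_zero_alt (inner_dict : List (String × Int)) (target_date : String) : Int :=
  let d := PySem.Dict.ofList inner_dict
  -- pass 1: the latest zero-valued date ≤ target
  let best := d.items.foldl (fun b kv =>
      if kv.2 == 0 && decide (kv.1 ≤ target_date) &&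
         (match b with | none => true | some z => decide (z < kv.1))
      then some kv.1 else b) none
  -- pass 2: count the dates ≤ target that are later than it
  let count := (d.keys.filter (fun k =>
      decide (k ≤ target_date) &&
      (match best with | none => true | some z => decide (z < k)))).length
  (count : Int)

-- ===== PRECONDITION & SPEC =====
def Spec_get_days_since_zero (inner_dict : List (String × Int)) (target_date : String) (out : Int) : Prop := out = get_days_since_zero_alt inner_dict target_date
instance (inner_dict : List (String × Int)) (target_date : String) (out : Int) : Decidable (Spec_get_days_since_zero inner_dict target_date out) := by unfold Spec_get_days_since_zero; infer_instance

-- ===== CLAIM (what is proved, stated in full; the proofs are below) =====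
def Claim_equal_get_days_since_zero : Prop := ∀ (inner_dict : List (String × Int)) (target_date : String), Dom_get_days_since_zero inner_dict target_date → Spec_get_days_since_zero inner_dict target_date (get_days_since_zero inner_dict target_date)

-- ===== LEMMAS AND PROOFS =====

-- the predicate both sides count: k is later than every zero-valued key of F
def pvQ (d : PySem.Dict String Int) (F : List String) (k : String) : Bool :=
  F.all (fun z => !(d.getD z 0 == 0) || decide (z < k))

-- A's loop on a strictly descending list counts the elements above all zero-valued ones
theorem pvLoopA_count (d : PySem.Dict String Int) :
    ∀ (S : List String) (i : Nat), S.Pairwise (fun a b => b < a) →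
    (match pvLoopA d S i with | some j => j | none => i + S.length)
      = i + S.countP (pvQ d S)
  | [], i, _ => by simp [pvLoopA]
  | k :: rest, i, h => by
    rcases List.pairwise_cons.mp h with ⟨hk, hrest⟩
    by_cases hc : (d.getD k 0 == 0) = true
    · have hcnt : (k :: rest).countP (pvQ d (k :: rest)) = 0 := by
        apply List.countP_eq_zero.mpr
        intro x hx
        simp only [pvQ, List.all_eq_true]
        intro hall
        have hthis := hall k (List.mem_cons_self ..)
        rcases List.mem_cons.mp hx with rfl | hxr
        · simp [hc] at hthis
        · have hlt := hk x hxr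
          simp only [hc, Bool.not_true, Bool.false_or, decide_eq_true_eq] at hthis
          exact absurd (lt_trans hlt hthis) (lt_irrefl _)
      simp [pvLoopA, hc, hcnt]
    · have IH := pvLoopA_count d rest (i + 1) hrest
      have hQk : pvQ d (k :: rest) k = true := by
        simp only [pvQ, List.all_eq_true]
        intro z hz
        rcases List.mem_cons.mp hz with rfl | hzr
        · simp [hc]
        · simp [hk z hzr]
      have hcong : rest.countP (pvQ d (k :: rest)) = rest.countP (pvQ d rest) := by
        apply List.countP_congr
        intro x hx
        simp only [pvQ, List.all_cons, hc]
        simp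
      have hcnt : (k :: rest).countP (pvQ d (k :: rest)) = 1 + rest.countP (pvQ d rest) := by
        rw [List.countP_cons_of_pos hQk, hcong]; omega
      cases h2 : pvLoopA d rest (i + 1) with
      | none => simp [pvLoopA, hc, h2] at IH ⊢; omega
      | some j => simp [pvLoopA, hc, h2] at IH ⊢; omega

-- characterisation of B's first pass: the fold keeps the largest key satisfying c
theorem pvBest_spec (c : String → Bool) :
    ∀ (K : List String) (b : Option String),
    (K.foldl (fun b k => if c k && (match b with | none => true | some z => decide (z < k)) then some k else b) b = none
       ↔ b = none ∧ ∀ k ∈ K, c k = false)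
    ∧ (∀ m, K.foldl (fun b k => if c k && (match b with | none => true | some z => decide (z < k)) then some k else b) b = some m →
         (b = some m ∨ (c m = true ∧ m ∈ K)) ∧ (∀ k ∈ K, c k = true → k ≤ m) ∧ (∀ z, b = some z → z ≤ m))
  | [], b => by
    simp only [List.foldl_nil]
    refine ⟨by simp, ?_⟩
    intro m hm
    refine ⟨Or.inl hm, by simp, ?_⟩
    intro z hz
    rw [hm] at hz
    exact le_of_eq (Option.some_injective _ hz.symm) |>.trans (le_refl m)
  | k :: K, b => by
    simp only [List.foldl_cons]
    by_cases hif : (c k && (match b with | none => true | some z => decide (z < k))) = true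
    · rw [if_pos hif]
      have IH := pvBest_spec c K (some k)
      rcases (Bool.and_eq_true _ _).mp hif with ⟨hck, hok⟩
      constructor
      · rw [IH.1]
        constructor
        · rintro ⟨h, -⟩; exact absurd h (by simp)
        · rintro ⟨-, hall⟩; exact absurd (hall k (List.mem_cons_self ..)) (by simp [hck])
      · intro m hm
        rcases IH.2 m hm with ⟨hd, hub, hb⟩
        have hkm : k ≤ m := hb k rfl
        refine ⟨?_, ?_, ?_⟩
        · rcases hd with h | ⟨hcm, hmK⟩
          · exact Or.inr ⟨(Option.some.injEq ..).mp h ▸ hck, by simp [(Option.some.injEq ..).mp h]⟩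
          · exact Or.inr ⟨hcm, List.mem_cons_of_mem _ hmK⟩
        · intro x hx hcx
          rcases List.mem_cons.mp hx with rfl | hxK
          · exact hkm
          · exact hub x hxK hcx
        · intro z hz
          rw [hz] at hok
          have : z < k := by simpa using hok
          exact le_of_lt (lt_of_lt_of_le this hkm)
    · rw [if_neg hif]
      have IH := pvBest_spec c K b
      constructor
      · rw [IH.1]
        constructor
        · rintro ⟨hb, hall⟩
          refine ⟨hb, ?_⟩
          intro x hx
          rcases List.mem_cons.mp hx with rfl | hxK
          · subst hb
            simpa using hif
          · exact hall x hxK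
        · rintro ⟨hb, hall⟩
          exact ⟨hb, fun x hx => hall x (List.mem_cons_of_mem _ hx)⟩
      · intro m hm
        rcases IH.2 m hm with ⟨hd, hub, hb⟩
        refine ⟨?_, ?_, hb⟩
        · rcases hd with h | ⟨hcm, hmK⟩
          · exact Or.inl h
          · exact Or.inr ⟨hcm, List.mem_cons_of_mem _ hmK⟩
        · intro x hx hcx
          rcases List.mem_cons.mp hx with rfl | hxK
          · rw [hcx, Bool.true_and] at hif
            cases hbv : b with
            | none => rw [hbv] at hif; simp at hif
            | some z =>
              rw [hbv] at hif
              have hzx : ¬ z < x := by simpa using hif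
              exact le_trans (le_of_not_gt hzx) (hb z hbv)
          · exact hub x hxK hcx

def pvM (b : Option String) (k : String) : Bool :=
  match b with | none => true | some z => decide (z < k)

-- ===== VERDICT (by name: the statement is the Claim_ definition above) =====
theorem get_days_since_zero_spec : Claim_equal_get_days_since_zero := by
  intro inner_dict t _
  unfold Spec_get_days_since_zero get_days_since_zero get_days_since_zero_alt
  simp only []
  set d := PySem.Dict.ofList inner_dict with hd
  have hnd : d.keys.Nodup := PySem.Dict.nodup_keys_ofList inner_dict
  have hndF : (d.keys.filter (fun k => decide (k ≤ t))).Nodup := hnd.filter _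
  set F := d.keys.filter (fun k => decide (k ≤ t)) with hF
  set S := PySem.List.sorted F (fun x => x) true with hS
  have hperm : S.Perm F := PySem.List.sorted_perm F (fun x => x) true
  have hpair : S.Pairwise (fun a b => b < a) := by
    have h1 := PySem.List.sorted_pairwise_rev F (fun x => x)
    have h2 : S.Nodup := hperm.symm.nodup hndF
    exact (h1.and h2).imp (fun h => lt_of_le_of_ne h.1 (Ne.symm h.2))
  have hA := pvLoopA_count d S 0 hpair
  have hQSF : pvQ d S = pvQ d F := funext fun k => Bool.coe_iff_coe.mp (by
    simp [pvQ, List.all_eq_true, hperm.mem_iff])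
  have hAval : (match pvLoopA d S 0 with | some i => (i : Int) | none => (S.length : Int))
      = ((F.countP (pvQ d F) : Nat) : Int) := by
    rw [hQSF, hperm.countP_eq] at hA
    cases h0 : pvLoopA d S 0 with
    | none => rw [h0] at hA; simp only [Nat.zero_add] at hA; simp [hA]
    | some j => rw [h0] at hA; simp only [Nat.zero_add] at hA; simp [hA]
  rw [hAval]
  have hitems : d.items = d.keys.map (fun k => (k, d.getD k 0)) := PySem.Dict.items_eq_map_keys d hnd 0
  rw [hitems, List.foldl_map]
  have spec := pvBest_spec (fun k => d.getD k 0 == 0 && decide (k ≤ t)) d.keys none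
  set best := d.keys.foldl (fun b k => if (d.getD k 0 == 0 && decide (k ≤ t)) && (match b with | none => true | some z => decide (z < k)) then some k else b) none with hbest
  clear_value best
  rw [← List.countP_eq_length_filter]
  rw [hF, List.countP_filter]
  congr 1
  apply List.countP_congr
  intro k hk
  suffices heq : (pvQ d F k && decide (k ≤ t)) = (decide (k ≤ t) && pvM best k) by
    rw [heq]; rfl
  by_cases hpt : (decide (k ≤ t)) = true
  · rw [hpt, Bool.and_true, Bool.true_and]
    cases hb : best with
    | none =>
      obtain ⟨-, hall⟩ := spec.1.mp hb
      simp only [pvQ]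
      have : ∀ z ∈ F, (!(d.getD z 0 == 0) || decide (z < k)) = true := by
        intro z hz
        obtain ⟨hzk, hzt⟩ := List.mem_filter.mp (hF ▸ hz)
        have hcz := hall z hzk
        simp only [hzt, Bool.and_true] at hcz
        simp [hcz]
      simp only [pvM]
      exact List.all_eq_true.mpr this
    | some m =>
      obtain ⟨hd', hub, -⟩ := spec.2 m hb
      have hcm : (d.getD m 0 == 0) = true ∧ (decide (m ≤ t)) = true := by
        rcases hd' with h | ⟨hcm', -⟩
        · exact absurd h (by simp)
        · exact (Bool.and_eq_true _ _).mp hcm'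
      have hmF : m ∈ F := by
        rw [hF]
        apply List.mem_filter.mpr
        refine ⟨?_, hcm.2⟩
        rcases hd' with h | ⟨-, hmK⟩
        · exact absurd h (by simp)
        · exact hmK
      by_cases hmk : m < k
      · have h1 : pvQ d F k = true := by
          simp only [pvQ, List.all_eq_true]
          intro z hz
          obtain ⟨hzk, hzt⟩ := List.mem_filter.mp (hF ▸ hz)
          by_cases hz0 : (d.getD z 0 == 0) = true
          · have hzm : z ≤ m := hub z hzk ((Bool.and_eq_true _ _).mpr ⟨hz0, hzt⟩)
            have hzk' : z < k := lt_of_le_of_lt hzm hmk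
            simp [hzk']
          · simp [Bool.eq_false_iff.mpr hz0]
        rw [h1]; simp [pvM, hmk]
      · have h1 : pvQ d F k = false := by
          apply Bool.eq_false_iff.mpr
          intro hall
          have := (List.all_eq_true.mp hall) m hmF
          simp only [hcm.1, Bool.not_true, Bool.false_or, decide_eq_true_eq] at this
          exact hmk this
        rw [h1]; simp [pvM, hmk]
  · have hpt' : (decide (k ≤ t)) = false := Bool.eq_false_iff.mpr hpt
    rw [hpt']
    simp [pvM]
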